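-- pv_equiv track=rewrite | github.com/Raxtion/RaxLib | Raxpy3Libbasic.py | ntmatch
-- ===== SOURCE A (Python) =====
-- def ntmatch(A_seq = '', B_seq = ''):
--
--     if len(A_seq) >= len(B_seq):
--
--         template = A_seq
--         seq = B_seq
--         marker1 = 'A'
--         marker2 = 'B'
--
--     elif len(B_seq) >= len(A_seq):
--
--         template = B_seq
--         seq = A_seq
--         marker1 = 'B'
--         marker2 = 'A'
--
--     def seqreturn(marker, loac):
--         if marker == 'A':
--             seq = B_seq
--             template = A_seq
--
--             new_seq = '-'*loac + seq
--             new_template = template + '-'*(len(new_seq)-len(template))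
--
--             if len(new_template) != len(new_seq):
--                 new_seq = new_seq + '-'*(len(template)-len(new_seq))
--
--             new_A = new_template
--             new_B = new_seq
--
--         elif marker == 'B':
--             seq = A_seq
--             template = B_seq
--
--             new_seq = '-'*loac + seq
--             new_template = template + '-'*(len(new_seq)-len(template))
--
--             if len(new_template) != len(new_seq):
--                 new_seq = new_seq + '-'*(len(template)-len(new_seq))
--
--             new_A = new_seq
--             new_B =  new_template
--         return new_A, new_B
--
--     def locationscore(template, seq, marker = 'A or B'):
--         score_list = []
--         location = 0
--         while location < (len(template)/1):
--
--             seq_location = 0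
--             score = 0
--
--             new_seq = '-'*location + seq
--             new_template = template + '-'*(len(new_seq)-len(template))
--
--             i = 1
--             for x in seq:
--
--                 if x == new_template[location+i-1]:
--                     score = score + 1
--
--                 i = i + 1
--
--             if score > int(len(template)/1):
--                 R = seqreturn(marker, location)
--                 result = (R[0], R[1])
--                 return result
--
--             score_list.append((score, location, marker))
--
--             location = location + 1
--         return score_list
--
--     score_list_1 = locationscore(template, seq, marker1)
--     if isinstance(score_list_1,tuple) == True:
--         return score_list_1
--     score_list_2 = locationscore(seq, template, marker2)
--     if isinstance(score_list_2,tuple) == True: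
--         return score_list_2
--
--     score_list = score_list_1 + score_list_2
--
--     score_list.sort()
--     marker = score_list[-1][2]
--     loac = score_list[-1][1]
--
--     R = seqreturn(marker, loac)
--
--     result = (R[0], R[1])
--
--     return result
-- ===== SOURCE B (Python) =====
-- def ntmatch(A_seq = '', B_seq = ''):
--     # pick the longer sequence as the primary template (A wins ties)
--     if len(A_seq) >= len(B_seq):
--         long_s, short_s, m_long, m_short = A_seq, B_seq, 'A', 'B'
--     else:
--         long_s, short_s, m_long, m_short = B_seq, A_seq, 'B', 'A'
--
--     def scores(t, s):
--         # score at offset loc = matches of s against t shifted by loc, where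
--         # positions of s hanging past the end of t are compared against '-'.
--         n = len(t)
--         # dash[k] = number of '-' in s[k:]  (tail part compared against padding)
--         dash = [0] * (len(s) + 1)
--         for k in range(len(s) - 1, -1, -1):
--             dash[k] = dash[k + 1] + (s[k] == '-')
--         out = []
--         for loc in range(n):
--             ov = n - loc
--             sc = sum(map(str.__eq__, s, t[loc:])) + dash[ov if ov < len(s) else len(s)]
--             out.append(sc)
--         return out
--
--     def align(marker, loc):
--         t, s = (A_seq, B_seq) if marker == 'A' else (B_seq, A_seq)
--         shifted = '-' * loc + s
--         if len(shifted) < len(t):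
--             shifted = shifted + '-' * (len(t) - len(shifted))
--         else:
--             t = t + '-' * (len(shifted) - len(t))
--         return (t, shifted) if marker == 'A' else (shifted, t)
--
--     # early exit: a shift of the long sequence over the short template whose
--     # score exceeds the template length (only reachable via '-' self-matches)
--     sc2 = scores(short_s, long_s)
--     for loc, sc in enumerate(sc2):
--         if sc > len(short_s):
--             return align(m_short, loc)
--
--     sc1 = scores(long_s, short_s)
--     best = max([(sc, loc, m_long) for loc, sc in enumerate(sc1)]
--                + [(sc, loc, m_short) for loc, sc in enumerate(sc2)])
--     return align(best[2], best[1])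
-- ===== Notes on version B (the rewrite author's own statement) =====
-- stated objective: faster
-- what changed: B drops A's per-offset padded-string rebuilding and final sort: it counts matches per offset with a sliced zip comparison plus a precomputed table of suffix dash counts, scans the short-template scores once for the early-exit case, and picks the best (score, offset, marker) with a single max pass under the same tie-break.
import Mathlib
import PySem

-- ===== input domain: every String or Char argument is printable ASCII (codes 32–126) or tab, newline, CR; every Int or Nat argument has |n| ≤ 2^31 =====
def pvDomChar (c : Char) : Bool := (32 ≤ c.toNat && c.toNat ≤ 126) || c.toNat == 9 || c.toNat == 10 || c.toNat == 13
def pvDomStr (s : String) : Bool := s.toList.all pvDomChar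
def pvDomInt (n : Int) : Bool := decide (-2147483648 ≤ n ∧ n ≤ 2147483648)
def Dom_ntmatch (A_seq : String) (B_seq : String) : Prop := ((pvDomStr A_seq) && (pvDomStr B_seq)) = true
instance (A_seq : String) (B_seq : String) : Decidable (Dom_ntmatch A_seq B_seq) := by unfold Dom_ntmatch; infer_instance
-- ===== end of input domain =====

-- B replaces A's per-offset padded-string rebuilding and final sort by sliced zip
-- match-counting with a precomputed table of suffix dash counts, a first-hit
-- early-exit scan, and a single max pass with the same (score, offset, marker) tie-break.

-- Python tuple comparison key (int, int, str), lexicographic — shared typeclass plumbing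
def tupKey (p : Nat × Nat × String) : Lex (Nat × Lex (Nat × String)) :=
  toLex (p.1, toLex (p.2.1, p.2.2))

-- ===== PORT A =====
-- score of one offset: Python builds new_template = template + '-'*(len('-'*location+seq)-len(template))
-- ('-'*negative is '' in Python; Nat subtraction clamps the same way) and walks seq with counter i
-- starting at 1; the index location+i-1 is always in range, so List.getD is exact here.
def scoreA (t s : List Char) (loc : Nat) : Nat :=
  let newT := t ++ List.replicate (loc + s.length - t.length) '-'
  (s.foldl (fun (st : Nat × Nat) x =>
    (if x == newT.getD (loc + st.2 - 1) '-' then st.1 + 1 else st.1, st.2 + 1)) (0, 1)).1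

-- the body common to seqreturn's two branches
def seqreturnP (tpl sq : List Char) (loac : Nat) : List Char × List Char :=
  let newSeq := List.replicate loac '-' ++ sq
  let newTemplate := tpl ++ List.replicate (newSeq.length - tpl.length) '-'
  let newSeq2 := if newTemplate.length ≠ newSeq.length then
      newSeq ++ List.replicate (tpl.length - newSeq.length) '-' else newSeq
  (newTemplate, newSeq2)

def seqreturnA (Aseq Bseq : String) (marker : String) (loac : Nat) : List String :=
  if marker == "A" then
    let p := seqreturnP Aseq.toList Bseq.toList loac
    [String.ofList p.1, String.ofList p.2]
  else
    let p := seqreturnP Bseq.toList Aseq.toList loac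
    [String.ofList p.2, String.ofList p.1]

-- the while-loop of locationscore; .inl = the early 'return result', .inr = the returned score_list
def locLoop (Aseq Bseq : String) (t s : List Char) (marker : String) :
    Nat → Nat → List (Nat × Nat × String) → Sum (List String) (List (Nat × Nat × String))
  | _, 0, acc => Sum.inr acc
  | loc, f + 1, acc =>
    let score := scoreA t s loc
    if t.length < score then Sum.inl (seqreturnA Aseq Bseq marker loc)
    else locLoop Aseq Bseq t s marker (loc + 1) f (acc ++ [(score, loc, marker)])

def ntmatch (A_seq : String) (B_seq : String) : List String :=
  let tq : List Char × List Char × String × String :=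
    if B_seq.toList.length ≤ A_seq.toList.length then (A_seq.toList, B_seq.toList, "A", "B")
    else (B_seq.toList, A_seq.toList, "B", "A")
  let template := tq.1
  let sq := tq.2.1
  match locLoop A_seq B_seq template sq tq.2.2.1 0 template.length [] with
  | Sum.inl r => r
  | Sum.inr l1 =>
    match locLoop A_seq B_seq sq template tq.2.2.2 0 sq.length [] with
    | Sum.inl r => r
    | Sum.inr l2 =>
      let sl := PySem.List.sorted (l1 ++ l2) tupKey
      -- score_list[-1]: raises on an empty list (both inputs empty) — excluded by Pre_
      let last := PySem.List.pyGetD sl (-1) (0, 0, "A")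
      seqreturnA A_seq B_seq last.2.2 last.2.1

-- ===== PORT B =====
-- dash[k] = number of dash characters in s[k:]; the Python fills the array right-to-left, this
-- structural recursion produces the same list
def dashTab : List Char → List Nat
  | [] => [0]
  | c :: cs =>
    let d := dashTab cs
    (d.headD 0 + (if c == '-' then 1 else 0)) :: d

-- per-offset scores: sum(map(str.__eq__, s, t[loc:])) + dash[min(n-loc, len(s))]
def scoresB (t s : List Char) : List Nat :=
  let dash := dashTab s
  (List.range t.length).map (fun loc =>
    (List.zipWith (fun a b => if a == b then (1 : Nat) else 0) s (t.drop loc)).sum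
      + dash.getD (min (t.length - loc) s.length) 0)

def alignB (Aseq Bseq : String) (marker : String) (loc : Nat) : List String :=
  let ts : List Char × List Char :=
    if marker == "A" then (Aseq.toList, Bseq.toList) else (Bseq.toList, Aseq.toList)
  let t := ts.1
  let shifted := List.replicate loc '-' ++ ts.2
  if shifted.length < t.length then
    let shifted2 := shifted ++ List.replicate (t.length - shifted.length) '-'
    if marker == "A" then [String.ofList t, String.ofList shifted2]
    else [String.ofList shifted2, String.ofList t]
  else
    let t2 := t ++ List.replicate (shifted.length - t.length) '-'
    if marker == "A" then [String.ofList t2, String.ofList shifted]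
    else [String.ofList shifted, String.ofList t2]

-- the 'for loc, sc in enumerate(sc2): if sc > thr: return …' first-hit scan
def earlyScan : List Nat → Nat → Nat → Option Nat
  | [], _, _ => none
  | sc :: rest, thr, loc => if thr < sc then some loc else earlyScan rest thr (loc + 1)

def ntmatch_alt (A_seq : String) (B_seq : String) : List String :=
  let tq : List Char × List Char × String × String :=
    if B_seq.toList.length ≤ A_seq.toList.length then (A_seq.toList, B_seq.toList, "A", "B")
    else (B_seq.toList, A_seq.toList, "B", "A")
  let longS := tq.1
  let shortS := tq.2.1
  let sc2 := scoresB shortS longS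
  match earlyScan sc2 shortS.length 0 with
  | some loc => alignB A_seq B_seq tq.2.2.2 loc
  | none =>
    let sc1 := scoresB longS shortS
    let cands := sc1.zipIdx.map (fun p => (p.1, p.2, tq.2.2.1))
      ++ sc2.zipIdx.map (fun p => (p.1, p.2, tq.2.2.2))
    -- max() of the candidate list (Python raises on empty — excluded by Pre_)
    let best := PySem.List.maxD cands tupKey (0, 0, "A")
    alignB A_seq B_seq best.2.2 best.2.1

-- ===== PRECONDITION & SPEC =====
-- Pre_ excludes only the pair of two empty strings, on which A raises IndexError
-- (score_list[-1] of the empty score list) and B raises ValueError (max of an empty sequence).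
def Pre_ntmatch (A_seq : String) (B_seq : String) : Prop := A_seq ≠ "" ∨ B_seq ≠ ""
instance (A_seq : String) (B_seq : String) : Decidable (Pre_ntmatch A_seq B_seq) := by
  unfold Pre_ntmatch; infer_instance
def pvWitness_ntmatch : String × String := ("ACGT", "CG")

def Spec_ntmatch (A_seq : String) (B_seq : String) (out : List String) : Prop := out = ntmatch_alt A_seq B_seq
instance (A_seq : String) (B_seq : String) (out : List String) : Decidable (Spec_ntmatch A_seq B_seq out) := by unfold Spec_ntmatch; infer_instance

-- ===== CLAIM (what is proved, stated in full; the proofs are below) =====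
def Claim_equal_ntmatch : Prop := ∀ (A_seq : String) (B_seq : String), Dom_ntmatch A_seq B_seq → Pre_ntmatch A_seq B_seq → Spec_ntmatch A_seq B_seq (ntmatch A_seq B_seq)

-- ===== LEMMAS AND PROOFS =====

-- the reference match count: s laid over t at absolute position k, past-the-end of t counts as '-'
def mcSpec (t : List Char) : List Char → Nat → Nat
  | [], _ => 0
  | x :: xs, k => (if x == (if k < t.length then t.getD k '-' else '-') then 1 else 0) + mcSpec t xs (k + 1)

theorem getD_pad (t : List Char) (m k : Nat) :
    (t ++ List.replicate m '-').getD k '-' = if k < t.length then t.getD k '-' else '-' := by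
  by_cases h : k < t.length
  · simp [List.getD_eq_getElem?_getD, List.getElem?_append_left h, h]
  · simp only [List.getD_eq_getElem?_getD, if_neg h]
    rw [List.getElem?_append_right (le_of_not_gt h)]
    simp [List.getElem?_replicate]
    split <;> rfl

theorem mcSpec_le (t s : List Char) : ∀ (k : Nat), mcSpec t s k ≤ s.length := by
  induction s with
  | nil => intro k; simp [mcSpec]
  | cons x xs ih =>
    intro k
    simp only [mcSpec, List.length_cons]
    have := ih (k + 1)
    split_ifs <;> omega

theorem score_fold (t : List Char) (m : Nat) (loc : Nat) :
    ∀ (s : List Char) (a i0 : Nat), 1 ≤ i0 →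
    (s.foldl (fun (st : Nat × Nat) x =>
      (if x == (t ++ List.replicate m '-').getD (loc + st.2 - 1) '-' then st.1 + 1 else st.1, st.2 + 1))
      (a, i0)).1 = a + mcSpec t s (loc + i0 - 1) := by
  intro s
  induction s with
  | nil => intro a i0 h; simp [mcSpec]
  | cons x xs ih =>
    intro a i0 h
    simp only [List.foldl_cons]
    rw [ih _ (i0 + 1) (by omega)]
    simp only [mcSpec, getD_pad]
    have h1 : loc + (i0 + 1) - 1 = (loc + i0 - 1) + 1 := by omega
    rw [h1]
    split_ifs <;> omega

theorem scoreA_eq_mc (t s : List Char) (loc : Nat) : scoreA t s loc = mcSpec t s loc := by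
  have h := score_fold t (loc + s.length - t.length) loc s 0 1 (le_refl 1)
  simpa [scoreA] using h

theorem earlyScan_none (scs : List Nat) (thr : Nat) : ∀ (l : Nat),
    earlyScan scs thr l = none ↔ ∀ x ∈ scs, x ≤ thr := by
  induction scs with
  | nil => intro l; simp [earlyScan]
  | cons sc rest ih =>
    intro l
    by_cases h : thr < sc
    · simp only [earlyScan, if_pos h]
      simp
      exact fun hc => absurd hc (not_le.mpr h)
    · simp only [earlyScan, if_neg h, ih (l + 1)]
      simp only [List.mem_cons]
      constructor
      · intro h2 x hx
        rcases hx with rfl | hx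
        · omega
        · exact h2 x hx
      · intro h2 x hx; exact h2 x (Or.inr hx)

theorem earlyScan_some (scs : List Nat) (thr : Nat) : ∀ (l r : Nat),
    earlyScan scs thr l = some r →
    ∃ j, j < scs.length ∧ r = l + j ∧ thr < scs.getD j 0 ∧ ∀ k, k < j → scs.getD k 0 ≤ thr := by
  induction scs with
  | nil => intro l r h; simp [earlyScan] at h
  | cons sc rest ih =>
    intro l r h
    by_cases hc : thr < sc
    · simp only [earlyScan, if_pos hc, Option.some.injEq] at h
      exact ⟨0, by simp, by omega, by simpa using hc, by omega⟩
    · simp only [earlyScan, if_neg hc] at h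
      obtain ⟨j, hj, hr, hgt, hle⟩ := ih (l + 1) r h
      refine ⟨j + 1, by simpa using hj, by omega, by simpa using hgt, ?_⟩
      intro k hk
      cases k with
      | zero => simpa using not_lt.mp hc
      | succ k' => simpa using hle k' (by omega)

theorem tupKey_inj : Function.Injective tupKey := by
  intro p q h
  obtain ⟨a, b, c⟩ := p
  obtain ⟨a', b', c'⟩ := q
  simp only [tupKey, toLex_inj, Prod.mk.injEq] at h
  simp [h.1, h.2.1, h.2.2]

theorem zipIdx_map_range {α : Type} (n : Nat) (f : Nat → α) :
    ((List.range n).map f).zipIdx = (List.range n).map (fun j => (f j, j)) := by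
  induction n with
  | zero => simp
  | succ k ih =>
    rw [List.range_succ, List.map_append, List.zipIdx_append, ih, List.map_append]
    simp

theorem last_is_max {α κ : Type} [LinearOrder κ] (key : α → κ)
    (l : List α) (h : l ≠ []) (hp : l.Pairwise (fun a b => key a ≤ key b)) :
    ∀ x ∈ l, key x ≤ key (l.getLast h) := by
  intro x hx
  obtain ⟨i, hi, rfl⟩ := List.mem_iff_getElem.mp hx
  rw [List.getLast_eq_getElem]
  rcases Nat.lt_or_ge i (l.length - 1) with hlt | hge
  · exact (List.pairwise_iff_getElem.mp hp) i (l.length - 1) hi (by omega) hlt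
  · have : i = l.length - 1 := by omega
    subst this; exact le_refl _

theorem pick_eq (C : List (Nat × Nat × String)) (hC : C ≠ []) (d : Nat × Nat × String) :
    PySem.List.pyGetD (PySem.List.sorted C tupKey) (-1) d = PySem.List.maxD C tupKey d := by
  have hperm := PySem.List.sorted_perm C tupKey false
  have hsne : PySem.List.sorted C tupKey ≠ [] := by
    intro hnil
    rw [hnil] at hperm
    exact hC (List.Perm.nil_eq hperm).symm
  rw [PySem.List.pyGetD_neg_one _ _ hsne]
  have hmax := PySem.List.max?_eq_some_maxD C tupKey d hC
  have hmmem : PySem.List.maxD C tupKey d ∈ C := PySem.List.maxD_mem C tupKey d hC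
  have hlastmem : (PySem.List.sorted C tupKey).getLast hsne ∈ C :=
    hperm.mem_iff.mp (List.getLast_mem hsne)
  have h1 : tupKey ((PySem.List.sorted C tupKey).getLast hsne) ≤ tupKey (PySem.List.maxD C tupKey d) :=
    PySem.List.max?_isMax hmax _ hlastmem
  have h2 : tupKey (PySem.List.maxD C tupKey d) ≤ tupKey ((PySem.List.sorted C tupKey).getLast hsne) :=
    last_is_max tupKey _ hsne (PySem.List.sorted_pairwise C tupKey) _ (hperm.mem_iff.mpr hmmem)
  exact tupKey_inj (le_antisymm h1 h2)

theorem dashTab_getD (s : List Char) : ∀ (k : Nat), k ≤ s.length →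
    (dashTab s).getD k 0 = (s.drop k).count '-' := by
  induction s with
  | nil =>
    intro k hk
    have hk0 : k = 0 := by simpa using hk
    subst hk0; simp [dashTab]
  | cons c cs ih =>
    intro k hk
    cases k with
    | zero =>
      have h0 : (dashTab cs).headD 0 = (dashTab cs).getD 0 0 := by
        cases hcs : dashTab cs with
        | nil => simp
        | cons a l => simp
      simp only [dashTab, List.getD_cons_zero, h0, ih 0 (by omega)]
      simp only [List.drop_zero, List.count_cons]
    | succ k' =>
      simp only [dashTab, List.getD_cons_succ]
      rw [ih k' (by simpa using hk)]
      simp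

theorem mc_eq_zip (t : List Char) : ∀ (s : List Char) (loc : Nat),
    mcSpec t s loc =
      (List.zipWith (fun a b => if a == b then (1 : Nat) else 0) s (t.drop loc)).sum
        + (s.drop (min (t.length - loc) s.length)).count '-' := by
  intro s
  induction s with
  | nil => intro loc; simp [mcSpec]
  | cons x xs ih =>
    intro loc
    by_cases hloc : loc < t.length
    · rw [List.drop_eq_getElem_cons hloc]
      simp only [List.zipWith_cons_cons, List.sum_cons, mcSpec, if_pos hloc]
      rw [ih (loc + 1)]
      have hmin : min (t.length - loc) (x :: xs).length = min (t.length - (loc + 1)) xs.length + 1 := by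
        simp only [List.length_cons]; omega
      rw [hmin]
      simp only [List.drop_succ_cons]
      have hget : t.getD loc '-' = t[loc] := List.getD_eq_getElem t '-' hloc
      rw [hget]
      omega
    · have hdrop : t.drop loc = [] := List.drop_eq_nil_of_le (by omega)
      have hmin : min (t.length - loc) (x :: xs).length = 0 := by
        simp only [List.length_cons]; omega
      rw [hdrop, hmin]
      simp only [List.zipWith_nil_right, List.sum_nil, List.drop_zero, Nat.zero_add]
      simp only [mcSpec, if_neg hloc]
      rw [ih (loc + 1)]
      have hdrop2 : t.drop (loc + 1) = [] := List.drop_eq_nil_of_le (by omega)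
      have hmin2 : min (t.length - (loc + 1)) xs.length = 0 := by omega
      rw [hdrop2, hmin2]
      simp [List.count_cons]
      split <;> omega

theorem scoresB_eq (t s : List Char) :
    scoresB t s = (List.range t.length).map (fun loc => mcSpec t s loc) := by
  unfold scoresB
  apply List.map_congr_left
  intro loc _
  rw [dashTab_getD s _ (min_le_right _ _), mc_eq_zip]

theorem seqreturnP_eq (t s : List Char) (loc : Nat) :
    seqreturnP t s loc =
      (let shifted := List.replicate loc '-' ++ s
       if shifted.length < t.length then (t, shifted ++ List.replicate (t.length - shifted.length) '-')
       else (t ++ List.replicate (shifted.length - t.length) '-', shifted)) := by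
  simp only [seqreturnP, List.length_append, List.length_replicate]
  by_cases hc : loc + s.length < t.length
  · have h0 : loc + s.length - t.length = 0 := by omega
    rw [h0]
    simp only [List.replicate_zero, List.append_nil]
    rw [if_pos hc, if_pos (by omega : t.length + 0 ≠ loc + s.length)]
  · rw [if_neg hc]
    rw [if_neg (by omega : ¬ t.length + (loc + s.length - t.length) ≠ loc + s.length)]

theorem align_eq (Aseq Bseq : String) (m : String) (loc : Nat) :
    alignB Aseq Bseq m loc = seqreturnA Aseq Bseq m loc := by
  by_cases hm : m == "A"
  · simp only [alignB, seqreturnA, if_pos hm, seqreturnP_eq]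
    split_ifs <;> rfl
  · simp only [alignB, seqreturnA, if_neg hm, seqreturnP_eq]
    split_ifs <;> rfl

theorem locLoop_no_early (Aseq Bseq : String) (t s : List Char) (m : String) :
    ∀ (fuel loc : Nat) (acc : List (Nat × Nat × String)),
    (∀ j, j < fuel → ¬ t.length < scoreA t s (loc + j)) →
    locLoop Aseq Bseq t s m loc fuel acc =
      Sum.inr (acc ++ (List.range' loc fuel).map (fun k => (scoreA t s k, k, m))) := by
  intro fuel
  induction fuel with
  | zero => intro loc acc _; simp [locLoop]
  | succ f ih =>
    intro loc acc h
    have h0 : ¬ t.length < scoreA t s loc := by simpa using h 0 (by omega)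
    simp only [locLoop, if_neg h0]
    rw [ih (loc + 1) _ (fun j hj => by
      have := h (j + 1) (by omega)
      rwa [show loc + (j + 1) = loc + 1 + j by omega] at this)]
    rw [List.range'_succ]
    simp

theorem locLoop_early (Aseq Bseq : String) (t s : List Char) (m : String) :
    ∀ (fuel loc : Nat) (acc : List (Nat × Nat × String)) (j : Nat),
    j < fuel → (∀ k, k < j → ¬ t.length < scoreA t s (loc + k)) →
    t.length < scoreA t s (loc + j) →
    locLoop Aseq Bseq t s m loc fuel acc = Sum.inl (seqreturnA Aseq Bseq m (loc + j)) := by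
  intro fuel
  induction fuel with
  | zero => intro loc acc j hj _ _; omega
  | succ f ih =>
    intro loc acc j hj hk hgt
    cases j with
    | zero =>
      simp only [Nat.add_zero] at hgt
      simp only [locLoop, if_pos hgt, Nat.add_zero]
    | succ j' =>
      have h0 : ¬ t.length < scoreA t s loc := by simpa using hk 0 (by omega)
      simp only [locLoop, if_neg h0]
      have := ih (loc + 1) (acc ++ [(scoreA t s loc, loc, m)]) j' (by omega)
        (fun k hk' => by
          have := hk (k + 1) (by omega)
          rwa [show loc + (k + 1) = loc + 1 + k by omega] at this)
        (by rwa [show loc + (j' + 1) = loc + 1 + j' by omega] at hgt)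
      rwa [show loc + 1 + j' = loc + (j' + 1) by omega] at this

theorem getD_map_range {α : Type} [Inhabited α] (f : Nat → α) (n j : Nat) (hj : j < n) (d : α) :
    ((List.range n).map f).getD j d = f j := by
  rw [List.getD_eq_getElem _ d (by simpa using hj)]
  simp

theorem core_eq (Aseq Bseq : String) (longS shortS : List Char) (mL mS : String)
    (hlen : shortS.length ≤ longS.length) (hne : longS ≠ []) :
    (match locLoop Aseq Bseq longS shortS mL 0 longS.length [] with
     | Sum.inl r => r
     | Sum.inr l1 =>
       match locLoop Aseq Bseq shortS longS mS 0 shortS.length [] with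
       | Sum.inl r => r
       | Sum.inr l2 =>
         let sl := PySem.List.sorted (l1 ++ l2) tupKey
         let last := PySem.List.pyGetD sl (-1) (0, 0, "A")
         seqreturnA Aseq Bseq last.2.2 last.2.1) =
    (let sc2 := scoresB shortS longS
     match earlyScan sc2 shortS.length 0 with
     | some loc => alignB Aseq Bseq mS loc
     | none =>
       let sc1 := scoresB longS shortS
       let cands := sc1.zipIdx.map (fun p => (p.1, p.2, mL))
         ++ sc2.zipIdx.map (fun p => (p.1, p.2, mS))
       let best := PySem.List.maxD cands tupKey (0, 0, "A")
       alignB Aseq Bseq best.2.2 best.2.1) := by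
  have hno1 : ∀ j, j < longS.length → ¬ longS.length < scoreA longS shortS (0 + j) := by
    intro j hj
    rw [Nat.zero_add, scoreA_eq_mc]
    have := mcSpec_le longS shortS j
    omega
  rw [locLoop_no_early Aseq Bseq longS shortS mL longS.length 0 [] hno1]
  have hsc2 : scoresB shortS longS = (List.range shortS.length).map (fun loc => mcSpec shortS longS loc) :=
    scoresB_eq shortS longS
  cases hE : earlyScan (scoresB shortS longS) shortS.length 0 with
  | some r =>
    obtain ⟨j, hj, hr, hgt, hle⟩ := earlyScan_some _ _ 0 r hE
    rw [hsc2] at hj hgt hle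
    simp only [List.length_map, List.length_range] at hj
    rw [getD_map_range _ _ j hj] at hgt
    have hearly := locLoop_early Aseq Bseq shortS longS mS shortS.length 0 [] j hj
      (fun k hk => by
        rw [Nat.zero_add, scoreA_eq_mc]
        have := hle k hk
        rw [getD_map_range _ _ k (by omega)] at this
        omega)
      (by rw [Nat.zero_add, scoreA_eq_mc]; exact hgt)
    rw [hearly]
    dsimp only
    rw [hE]
    dsimp only
    rw [hr, Nat.zero_add, align_eq]
  | none =>
    have hall := (earlyScan_none _ _ 0).mp hE
    rw [hsc2] at hall
    have hno2 : ∀ j, j < shortS.length → ¬ shortS.length < scoreA shortS longS (0 + j) := by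
      intro j hj
      rw [Nat.zero_add, scoreA_eq_mc]
      have := hall (mcSpec shortS longS j) (List.mem_map.mpr ⟨j, List.mem_range.mpr hj, rfl⟩)
      omega
    rw [locLoop_no_early Aseq Bseq shortS longS mS shortS.length 0 [] hno2]
    dsimp only
    rw [hE]
    dsimp only
    have hcands :
        (scoresB longS shortS).zipIdx.map (fun p => (p.1, p.2, mL))
          ++ (scoresB shortS longS).zipIdx.map (fun p => (p.1, p.2, mS)) =
        ([] ++ (List.range' 0 longS.length).map (fun k => (scoreA longS shortS k, k, mL)))
          ++ ([] ++ (List.range' 0 shortS.length).map (fun k => (scoreA shortS longS k, k, mS))) := by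
      rw [scoresB_eq, scoresB_eq, zipIdx_map_range, zipIdx_map_range, List.map_map, List.map_map]
      simp only [List.nil_append, ← List.range_eq_range']
      congr 1
      · exact List.map_congr_left (fun j _ => by simp [Function.comp, scoreA_eq_mc])
      · exact List.map_congr_left (fun j _ => by simp [Function.comp, scoreA_eq_mc])
    have hCne : ([] ++ (List.range' 0 longS.length).map (fun k => (scoreA longS shortS k, k, mL)))
        ++ ([] ++ (List.range' 0 shortS.length).map (fun k => (scoreA shortS longS k, k, mS))) ≠ [] := by
      simp only [List.nil_append, ← List.range_eq_range']
      intro hc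
      rcases List.append_eq_nil_iff.mp hc with ⟨h1, _⟩
      have : longS.length = 0 := by simpa using congrArg List.length h1
      exact hne (List.eq_nil_of_length_eq_zero this)
    simp only [hcands]
    rw [pick_eq _ hCne, align_eq]

theorem main_thm (A_seq B_seq : String) (hpre : A_seq ≠ "" ∨ B_seq ≠ "") :
    ntmatch A_seq B_seq = ntmatch_alt A_seq B_seq := by
  by_cases h : B_seq.toList.length ≤ A_seq.toList.length
  · have hne : A_seq.toList ≠ [] := by
      intro hnil
      have hb : B_seq.toList = [] := by
        rw [hnil] at h
        simp only [List.length_nil, Nat.le_zero] at h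
        exact List.eq_nil_of_length_eq_zero h
      rcases hpre with ha | hbne
      · exact ha (String.toList_eq_nil_iff.mp hnil)
      · exact hbne (String.toList_eq_nil_iff.mp hb)
    unfold ntmatch ntmatch_alt
    rw [if_pos h]
    exact core_eq A_seq B_seq A_seq.toList B_seq.toList "A" "B" h hne
  · have hlen : A_seq.toList.length ≤ B_seq.toList.length := by omega
    have hne : B_seq.toList ≠ [] := by
      intro hnil
      rw [hnil] at h
      simp at h
    unfold ntmatch ntmatch_alt
    rw [if_neg h]
    exact core_eq A_seq B_seq B_seq.toList A_seq.toList "B" "A" hlen hne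

-- ===== VERDICT (by name: the statement is the Claim_ definition above) =====
theorem ntmatch_spec : Claim_equal_ntmatch := by
  intro A_seq B_seq _ hpre
  unfold Spec_ntmatch
  exact main_thm A_seq B_seq hpre
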